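-- pv_equiv track=rewrite | github.com/ingann/DSA-course | samedist.py | find
-- ===== SOURCE A (Python) =====
-- def find(t):
--
--     pos = {}
--     found = False
--     result = 0
--
--     for i, no in enumerate(t):
--         if no in pos:
--             pos[no].append(i)
--             found = True
--         else:
--             pos[no] = [i]
--
--     result = 0
--
--     for key in pos:
--         result = max(result, (max(pos[key])-min(pos[key])))
--
--     if found:
--         return result
--     return 0
-- ===== SOURCE B (Python) =====
-- def find(t):
--     first = {}
--     result = 0
--     for i, no in enumerate(t):
--         if no in first:
--             result = max(result, i - first[no])
--         else:
--             first[no] = i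
--     return result
-- ===== Notes on version B (the rewrite author's own statement) =====
-- stated objective: simpler
-- what changed: Single pass keeping only each value's first-seen index and a running max of i - first[no], instead of building full per-value position lists and then a second loop over the dict taking max(positions)-min(positions).
import Mathlib
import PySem

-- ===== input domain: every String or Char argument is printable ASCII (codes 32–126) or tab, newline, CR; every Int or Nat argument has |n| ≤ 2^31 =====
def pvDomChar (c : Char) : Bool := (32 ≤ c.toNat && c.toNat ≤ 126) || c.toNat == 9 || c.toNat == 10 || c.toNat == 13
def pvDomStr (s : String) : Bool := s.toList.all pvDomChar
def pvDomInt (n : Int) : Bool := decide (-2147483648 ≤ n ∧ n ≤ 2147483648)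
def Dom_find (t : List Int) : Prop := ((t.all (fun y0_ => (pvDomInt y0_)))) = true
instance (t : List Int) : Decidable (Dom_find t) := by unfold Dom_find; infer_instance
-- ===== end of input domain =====

-- B replaces A's per-value position lists plus a second loop over the dict by a single
-- pass that stores only each value's first-seen index and a running max (objective: simpler).

-- ===== PORT A =====
-- one loop iteration of A: pos[no].append(i) / pos[no] = [i], and the found flag
def findStep (st : PySem.Dict Int (List Int) × Bool) (p : Int × Int) :
    PySem.Dict Int (List Int) × Bool :=
  match st.1.get? p.2 with
  | some l => (st.1.insert p.2 (l ++ [p.1]), true)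
  | none   => (st.1.insert p.2 [p.1], st.2)

def find (t : List Int) : Int :=
  let st := (PySem.List.enumerate t 0).foldl findStep (PySem.Dict.empty, false)
  -- second loop: result = max(result, max(pos[key]) - min(pos[key]));
  -- pos[key] is always nonempty, so the .getD 0 default of max?/min? is never used
  let result := st.1.keys.foldl
    (fun r k => max r (((PySem.List.max? (st.1.getD k []) (fun y => y)).getD 0)
                        - ((PySem.List.min? (st.1.getD k []) (fun y => y)).getD 0))) 0
  if st.2 then result else 0

-- ===== PORT B =====
-- one loop iteration of B: running max of i - first[no], or record first[no] = i
def findAltStep (st : PySem.Dict Int Int × Int) (p : Int × Int) :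
    PySem.Dict Int Int × Int :=
  match st.1.get? p.2 with
  | some f => (st.1, max st.2 (p.1 - f))
  | none   => (st.1.insert p.2 p.1, st.2)

def find_alt (t : List Int) : Int :=
  ((PySem.List.enumerate t 0).foldl findAltStep (PySem.Dict.empty, 0)).2

-- ===== PRECONDITION & SPEC =====
def Spec_find (t : List Int) (out : Int) : Prop := out = find_alt t
instance (t : List Int) (out : Int) : Decidable (Spec_find t out) := by unfold Spec_find; infer_instance

-- ===== CLAIM (what is proved, stated in full; the proofs are below) =====
def Claim_equal_find : Prop := ∀ (t : List Int), Dom_find t → Spec_find t (find t)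

-- ===== LEMMAS AND PROOFS =====

-- occ t v : the (increasing) list of indices at which v occurs in t
def occ (t : List Int) (v : Int) : List Int :=
  ((PySem.List.enumerate t 0).filter (fun p => p.2 == v)).map (·.1)

-- gap t k : max(occ) - min(occ), exactly as A's second loop computes it
def gap (t : List Int) (k : Int) : Int :=
  ((PySem.List.max? (occ t k) (fun y => y)).getD 0)
    - ((PySem.List.min? (occ t k) (fun y => y)).getD 0)

-- G t : the common value of both programs
def G (t : List Int) : Int :=
  (PySem.Set.ofList t).foldl (fun r k => max r (gap t k)) 0

lemma occ_append (t : List Int) (x v : Int) :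
    occ (t ++ [x]) v = occ t v ++ (if x = v then [((t.length : Int))] else []) := by
  simp only [occ, PySem.List.enumerate_append, List.filter_append, List.map_append]
  congr 1
  by_cases h : x = v <;>
    simp [PySem.List.enumerate, h]

lemma occ_eq_nil_iff (t : List Int) (v : Int) : occ t v = [] ↔ v ∉ t := by
  simp only [occ, List.map_eq_nil_iff, List.filter_eq_nil_iff]
  constructor
  · intro h hv
    obtain ⟨k, hk, rfl⟩ := List.mem_iff_getElem.mp hv
    have := h ((0 + (k : Int)), t[k]) (by
      rw [PySem.List.mem_enumerate_iff]; exact ⟨k, hk, rfl⟩)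
    simp at this
  · intro hv p hp
    rw [PySem.List.mem_enumerate_iff] at hp
    obtain ⟨k, hk, rfl⟩ := hp
    simp only [beq_iff_eq]
    intro h; exact hv (h ▸ List.getElem_mem hk)

lemma occ_mem_lt (t : List Int) (v : Int) {y : Int} (hy : y ∈ occ t v) :
    y < (t.length : Int) := by
  simp only [occ, List.mem_map, List.mem_filter] at hy
  obtain ⟨p, ⟨hp, _⟩, rfl⟩ := hy
  rw [PySem.List.mem_enumerate_iff] at hp
  obtain ⟨k, hk, rfl⟩ := hp
  simp; omega

-- min of l ++ [c] when c strictly dominates a nonempty l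
lemma min?_append_singleton (l : List Int) (c : Int) (hne : l ≠ [])
    (hlt : ∀ y ∈ l, y < c) :
    PySem.List.min? (l ++ [c]) (fun y => y) = PySem.List.min? l (fun y => y) := by
  obtain ⟨m, hm⟩ : ∃ m, PySem.List.min? (l ++ [c]) (fun y => y) = some m := by
    cases h : PySem.List.min? (l ++ [c]) (fun y => y) with
    | none => rw [PySem.List.min?_eq_none_iff] at h; simp at h
    | some m => exact ⟨m, rfl⟩
  obtain ⟨m', hm'⟩ : ∃ m', PySem.List.min? l (fun y => y) = some m' := by
    cases h : PySem.List.min? l (fun y => y) with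
    | none => rw [PySem.List.min?_eq_none_iff] at h; exact absurd h hne
    | some m' => exact ⟨m', rfl⟩
  have hmmem := PySem.List.min?_mem hm
  have hmin := PySem.List.min?_isMin hm
  have hm'mem := PySem.List.min?_mem hm'
  have hmin' := PySem.List.min?_isMin hm'
  have hml : m ∈ l := by
    rcases List.mem_append.mp hmmem with h | h
    · exact h
    · simp only [List.mem_singleton] at h
      subst h
      obtain ⟨y, hy⟩ := List.exists_mem_of_ne_nil l hne
      exact absurd (hmin y (List.mem_append_left _ hy)) (by have := hlt y hy; omega)
  have h1 : m' ≤ m := hmin' m hml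
  have h2 : m ≤ m' := hmin m' (List.mem_append_left _ hm'mem)
  rw [hm, hm']
  exact congrArg some (le_antisymm h2 h1)

lemma max?_append_singleton (l : List Int) (c : Int) (hlt : ∀ y ∈ l, y < c) :
    PySem.List.max? (l ++ [c]) (fun y => y) = some c := by
  obtain ⟨M, hM⟩ : ∃ M, PySem.List.max? (l ++ [c]) (fun y => y) = some M := by
    cases h : PySem.List.max? (l ++ [c]) (fun y => y) with
    | none => rw [PySem.List.max?_eq_none_iff] at h; simp at h
    | some M => exact ⟨M, rfl⟩
  have hMmem := PySem.List.max?_mem hM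
  have hmax := PySem.List.max?_isMax hM
  have : M = c := by
    rcases List.mem_append.mp hMmem with h | h
    · have h1 := hlt M h
      have h2 := hmax c (List.mem_append_right _ (by simp))
      omega
    · simpa using h
  rw [hM, this]

-- a running max distributes over max in the initial value
lemma foldmax_init (f : Int → Int) (l : List Int) :
    ∀ a c, l.foldl (fun r v => max r (f v)) (max a c)
      = max (l.foldl (fun r v => max r (f v)) a) c := by
  induction l with
  | nil => intro a c; simp
  | cons x xs ih =>
    intro a c
    simp only [List.foldl_cons]
    rw [max_right_comm a c (f x), ih]

-- raising the value of f at one element x of a Nodup list to g x ≥ f x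
lemma foldmax_update (S : List Int) (f g : Int → Int) (x : Int) :
    ∀ a, x ∈ S → S.Nodup → (∀ v ∈ S, v ≠ x → g v = f v) → f x ≤ g x →
    S.foldl (fun r v => max r (g v)) a
      = max (S.foldl (fun r v => max r (f v)) a) (g x) := by
  induction S with
  | nil => intro a hx; simp at hx
  | cons v rest ih =>
    intro a hx hnd hg hfg
    simp only [List.foldl_cons]
    by_cases hvx : v = x
    · subst hvx
      have hnotin : v ∉ rest := (List.nodup_cons.mp hnd).1
      have hsame : rest.foldl (fun r w => max r (g w)) (max a (g v))
          = rest.foldl (fun r w => max r (f w)) (max a (g v)) :=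
        PySem.List.foldl_congr_mem rest _ _ _ (by
          intro acc w hw
          rw [hg w (List.mem_cons_of_mem _ hw) (fun h => hnotin (h ▸ hw))])
      rw [hsame, foldmax_init, foldmax_init]
      omega
    · have hx' : x ∈ rest := by
        rcases List.mem_cons.mp hx with h | h
        · exact absurd h.symm hvx
        · exact h
      rw [hg v (List.mem_cons_self) hvx,
        ih (max a (f v)) hx' (List.nodup_cons.mp hnd).2
          (fun w hw => hg w (List.mem_cons_of_mem _ hw)) hfg]

lemma foldmax_zero (S : List Int) (f : Int → Int) :
    ∀ a, 0 ≤ a → (∀ v ∈ S, f v = 0) → S.foldl (fun r v => max r (f v)) a = a := by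
  induction S with
  | nil => intro a _ _; rfl
  | cons v rest ih =>
    intro a ha hf
    simp only [List.foldl_cons]
    rw [hf v List.mem_cons_self, show max a 0 = a by omega]
    exact ih a ha (fun w hw => hf w (List.mem_cons_of_mem _ hw))

-- ===== characterisation of A's first loop =====

lemma stateA_inv (t : List Int) :
    let st := (PySem.List.enumerate t 0).foldl findStep (PySem.Dict.empty, false)
    st.1.keys = PySem.Set.ofList t ∧
    (∀ v, st.1.get? v = if v ∈ t then some (occ t v) else none) ∧
    (st.2 = true ↔ ¬ t.Nodup) := by
  induction t using List.reverseRecOn with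
  | nil => refine ⟨rfl, fun v => rfl, by simp⟩
  | append_singleton t x ih =>
    obtain ⟨hkeys, hget, hfound⟩ := ih
    rw [PySem.List.enumerate_append, List.foldl_append]
    set st := (PySem.List.enumerate t 0).foldl findStep (PySem.Dict.empty, false) with hst
    simp only [PySem.List.enumerate, List.foldl_cons, List.foldl_nil, zero_add]
    by_cases hx : x ∈ t
    · have hgx : st.1.get? x = some (occ t x) := by rw [hget x, if_pos hx]
      have hcont : st.1.contains x = true := by
        rw [PySem.Dict.contains_eq_isSome_get?, hgx]; rfl
      simp only [findStep, hgx]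
      refine ⟨?_, ?_, ?_⟩
      · rw [PySem.Dict.keys_insert_of_contains st.1 _ hcont, hkeys,
          PySem.Set.ofList_append_singleton,
          PySem.Set.add_of_mem ((PySem.Set.mem_ofList t x).mpr hx)]
      · intro v
        by_cases hv : v = x
        · subst hv
          rw [PySem.Dict.get?_insert_self, if_pos (show v ∈ t ++ [v] by simp),
            occ_append, if_pos rfl]
        · rw [PySem.Dict.get?_insert_of_ne st.1 _ hv, hget v, occ_append,
            if_neg (show ¬ x = v from fun h => hv h.symm)]
          simp only [List.append_nil, List.mem_append, List.mem_singleton]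
          by_cases hvt : v ∈ t
          · rw [if_pos hvt, if_pos (Or.inl hvt)]
          · rw [if_neg hvt, if_neg (show ¬ (v ∈ t ∨ v = x) by rintro (h | h); exact hvt h; exact hv h)]
      · constructor
        · intro _ h
          exact (List.nodup_append.mp h).2.2 x hx x (List.Mem.head _) rfl
        · intro _; trivial
    · have hgx : st.1.get? x = none := by rw [hget x, if_neg hx]
      have hcont : st.1.contains x = false := by
        rw [PySem.Dict.contains_eq_isSome_get?, hgx]; rfl
      simp only [findStep, hgx]
      refine ⟨?_, ?_, ?_⟩
      · rw [PySem.Dict.keys_insert_of_not_contains st.1 _ hcont, hkeys,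
          PySem.Set.ofList_append_singleton,
          PySem.Set.add_of_not_mem (fun h => hx ((PySem.Set.mem_ofList t x).mp h))]
      · intro v
        by_cases hv : v = x
        · subst hv
          rw [PySem.Dict.get?_insert_self, if_pos (show v ∈ t ++ [v] by simp),
            occ_append, if_pos rfl, (occ_eq_nil_iff t v).mpr hx]
          simp
        · rw [PySem.Dict.get?_insert_of_ne st.1 _ hv, hget v, occ_append,
            if_neg (show ¬ x = v from fun h => hv h.symm)]
          simp only [List.append_nil, List.mem_append, List.mem_singleton]
          by_cases hvt : v ∈ t
          · rw [if_pos hvt, if_pos (Or.inl hvt)]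
          · rw [if_neg hvt, if_neg (show ¬ (v ∈ t ∨ v = x) by rintro (h | h); exact hvt h; exact hv h)]
      · rw [hfound]
        constructor
        · intro h hn
          exact h (List.nodup_append.mp hn).1
        · intro h hn
          exact h (by
            rw [List.nodup_append]
            exact ⟨hn, List.nodup_singleton x, by
              intro a ha b hb; simp only [List.mem_singleton] at hb
              subst hb; exact fun he => hx (he ▸ ha)⟩)

-- ===== A equals G =====

lemma nodup_G_eq_zero (t : List Int) (hnd : t.Nodup) : G t = 0 := by
  unfold G
  refine foldmax_zero _ _ 0 le_rfl ?_
  intro v hv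
  rw [PySem.Set.mem_ofList] at hv
  have hlen : (occ t v).length = 1 := by
    have h1 : (occ t v).length
        = (PySem.List.enumerate t 0).countP (fun p => p.2 == v) := by
      simp [occ, List.countP_eq_length_filter]
    have h2 : (PySem.List.enumerate t 0).countP (fun p => p.2 == v) = t.count v := by
      have hmap := PySem.List.map_snd_enumerate t (0 : Int)
      calc (PySem.List.enumerate t 0).countP (fun p => p.2 == v)
          = ((PySem.List.enumerate t 0).map (·.2)).countP (fun y => y == v) := by
            rw [List.countP_map]; rfl
        _ = t.count v := by rw [hmap]; rfl
    rw [h1, h2]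
    exact List.count_eq_one_of_mem hnd hv
  obtain ⟨i, hi⟩ := List.length_eq_one_iff.mp hlen
  simp [gap, hi, PySem.List.max?_id_cons, PySem.List.min?_id_cons]

lemma find_eq_G (t : List Int) : find t = G t := by
  obtain ⟨hkeys, hget, hfound⟩ := stateA_inv t
  show (if _ then _ else _) = _
  set st := (PySem.List.enumerate t 0).foldl findStep (PySem.Dict.empty, false) with hst
  have hloop : st.1.keys.foldl
      (fun r k => max r (((PySem.List.max? (st.1.getD k []) (fun y => y)).getD 0)
        - ((PySem.List.min? (st.1.getD k []) (fun y => y)).getD 0))) 0 = G t := by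
    rw [hkeys]
    unfold G
    refine PySem.List.foldl_congr_mem _ _ _ _ ?_
    intro acc k hk
    rw [PySem.Set.mem_ofList] at hk
    have hgd : st.1.getD k [] = occ t k := by
      rw [PySem.Dict.getD_eq_get?_getD, hget k, if_pos hk]; rfl
    rw [hgd]; rfl
  by_cases hnd : t.Nodup
  · rw [if_neg (fun h => (hfound.mp h) hnd), nodup_G_eq_zero t hnd]
  · rw [if_pos (hfound.mpr hnd), hloop]

-- ===== characterisation of B's loop =====

lemma stateB_inv (t : List Int) :
    let st := (PySem.List.enumerate t 0).foldl findAltStep (PySem.Dict.empty, 0)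
    (∀ v, st.1.get? v = PySem.List.min? (occ t v) (fun y => y)) ∧ st.2 = G t := by
  induction t using List.reverseRecOn with
  | nil => exact ⟨fun v => rfl, rfl⟩
  | append_singleton t x ih =>
    obtain ⟨hget, hres⟩ := ih
    rw [PySem.List.enumerate_append, List.foldl_append]
    set st := (PySem.List.enumerate t 0).foldl findAltStep (PySem.Dict.empty, 0) with hst
    simp only [PySem.List.enumerate, List.foldl_cons, List.foldl_nil, zero_add]
    have hocclt : ∀ y ∈ occ t x, y < (t.length : Int) := fun y hy => occ_mem_lt t x hy
    by_cases hx : x ∈ t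
    · have hocc_ne : occ t x ≠ [] := fun h => ((occ_eq_nil_iff t x).mp h) hx
      obtain ⟨f, hf⟩ : ∃ f, PySem.List.min? (occ t x) (fun y => y) = some f := by
        cases h : PySem.List.min? (occ t x) (fun y => y) with
        | none => rw [PySem.List.min?_eq_none_iff] at h; exact absurd h hocc_ne
        | some f => exact ⟨f, rfl⟩
      have hgx : st.1.get? x = some f := by rw [hget x, hf]
      simp only [findAltStep, hgx]
      constructor
      · intro v
        rw [hget v, occ_append]
        by_cases hv : x = v
        · subst hv
          rw [if_pos rfl, min?_append_singleton _ _ hocc_ne hocclt]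
        · rw [if_neg hv, List.append_nil]
      · rw [hres]
        have hxS : x ∈ PySem.Set.ofList t := (PySem.Set.mem_ofList t x).mpr hx
        have hS : PySem.Set.ofList (t ++ [x]) = PySem.Set.ofList t := by
          rw [PySem.Set.ofList_append_singleton, PySem.Set.add_of_mem hxS]
        have hgapx : gap (t ++ [x]) x = (t.length : Int) - f := by
          unfold gap
          rw [occ_append, if_pos rfl,
            max?_append_singleton _ _ hocclt,
            min?_append_singleton _ _ hocc_ne hocclt, hf]
          rfl
        have hgapv : ∀ v ∈ PySem.Set.ofList t, v ≠ x → gap (t ++ [x]) v = gap t v := by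
          intro v _ hvx
          unfold gap
          rw [occ_append, if_neg (show ¬ x = v from fun h => hvx h.symm), List.append_nil]
        have hle : gap t x ≤ gap (t ++ [x]) x := by
          rw [hgapx]
          unfold gap
          obtain ⟨M, hM⟩ : ∃ M, PySem.List.max? (occ t x) (fun y => y) = some M := by
            cases h : PySem.List.max? (occ t x) (fun y => y) with
            | none => rw [PySem.List.max?_eq_none_iff] at h; exact absurd h hocc_ne
            | some M => exact ⟨M, rfl⟩
          rw [hM, hf]
          have := hocclt M (PySem.List.max?_mem hM)
          simp only [Option.getD_some]
          omega
        have hkey : G (t ++ [x]) = max (G t) ((t.length : Int) - f) := by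
          unfold G
          rw [hS, foldmax_update (PySem.Set.ofList t) (gap t) (gap (t ++ [x])) x 0 hxS
              (PySem.Set.nodup_ofList t) hgapv hle, hgapx]
        rw [hkey]
    · have hgx : st.1.get? x = none := by
        rw [hget x, (occ_eq_nil_iff t x).mpr hx]; rfl
      simp only [findAltStep, hgx]
      constructor
      · intro v
        by_cases hv : v = x
        · subst hv
          rw [PySem.Dict.get?_insert_self, occ_append, if_pos rfl,
            (occ_eq_nil_iff t v).mpr hx]
          simp [PySem.List.min?_id_cons]
        · rw [PySem.Dict.get?_insert_of_ne st.1 _ hv, hget v, occ_append,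
            if_neg (show ¬ x = v from fun h => hv h.symm), List.append_nil]
      · rw [hres]
        have hxS : x ∉ PySem.Set.ofList t := fun h => hx ((PySem.Set.mem_ofList t x).mp h)
        unfold G
        rw [PySem.Set.ofList_append_singleton, PySem.Set.add_of_not_mem hxS,
          List.foldl_append]
        have h1 : (PySem.Set.ofList t).foldl (fun r k => max r (gap (t ++ [x]) k)) 0
            = (PySem.Set.ofList t).foldl (fun r k => max r (gap t k)) 0 := by
          refine PySem.List.foldl_congr_mem _ _ _ _ ?_
          intro acc k hk
          rw [PySem.Set.mem_ofList] at hk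
          have hocck : gap (t ++ [x]) k = gap t k := by
            unfold gap
            rw [occ_append, if_neg (show ¬ x = k from fun h => hx (h ▸ hk)), List.append_nil]
          rw [hocck]
        have hgapx : gap (t ++ [x]) x = 0 := by
          unfold gap
          rw [occ_append, if_pos rfl, (occ_eq_nil_iff t x).mpr hx]
          simp [PySem.List.max?_id_cons, PySem.List.min?_id_cons]
        have hnn : 0 ≤ (PySem.Set.ofList t).foldl (fun r k => max r (gap t k)) 0 :=
          (PySem.List.le_foldl_max_int _ _ _).1
        simp only [List.foldl_cons, List.foldl_nil, h1, hgapx]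
        omega

lemma find_alt_eq_G (t : List Int) : find_alt t = G t := (stateB_inv t).2

-- ===== VERDICT (by name: the statement is the Claim_ definition above) =====
theorem find_spec : Claim_equal_find := by
  intro t _
  unfold Spec_find
  rw [find_eq_G, find_alt_eq_G]
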